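-- pv_equiv track=rewrite | github.com/dyshleva/pb-homework | week4/lab4_task_1.py | pattern_number
-- ===== SOURCE A (Python) =====
-- def pattern_number(sequence: list) -> tuple:
--     """
--     Return the longest repeating pattern
--     and a number of occurences of said pattern.
--
--     :param sequence: list of literals
--
--     :rtype: tuple: pair of occurence and number or occurences
--     >>> pattern_number([])
--
--     >>> pattern_number([42])
--
--     >>> pattern_number([1,2])
--
--     >>> pattern_number([1,1])
--     ([1], 2)
--     >>> pattern_number([1,2,1])
--
--     >>> pattern_number([1,2,3,1,2,3])
--     ([1, 2, 3], 2)
--     >>> pattern_number([1,2,3,1,2])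
--
--     >>> pattern_number([1,2,3,1,2,3,1])
--
--     >>> pattern_number(list(range(10))*20)
--     ([0, 1, 2, 3, 4, 5, 6, 7, 8, 9, 0, 1, 2, 3, 4, 5, 6, 7, 8, 9, 0, 1, 2, 3, 4, 5, 6, 7, 8, 9,\
--  0, 1, 2, 3, 4, 5, 6, 7, 8, 9, 0, 1, 2, 3, 4, 5, 6, 7, 8, 9, 0, 1, 2, 3, 4, 5, 6, 7, 8,\
--  9, 0, 1,\
--  2, 3, 4, 5, 6, 7, 8, 9, 0, 1, 2, 3, 4, 5, 6, 7, 8, 9, 0, 1, 2, 3, 4, 5, 6, 7, 8, 9, 0, 1, 2, 3,\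
--  4, 5, 6, 7, 8, 9], 2)
--     >>> pattern_number('мама')
--     ('ма', 2)
--     >>> pattern_number('барабан')
--
--     """
--
--     if len(sequence) <= 1:
--         return None
--
--     final = None
--     result = [None, 0]
--     for i in range(1, len(sequence) // 2 + 1):
--         res = sequence[0:i]
--         if (
--             res is not None
--             and res * int(len(sequence) / len(res)) == sequence
--         ):
--             result = [res, len(sequence) // i]
--
--     if result[0] is not None:
--         final = (result[0], result[1])
--
--     return final
-- ===== SOURCE B (Python) =====
-- def pattern_number(sequence):
--     """Longest prefix that tiles the whole sequence, with its repetition count."""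
--     n = len(sequence)
--     if n <= 1:
--         return None
--     for i in range(n // 2, 0, -1):
--         if n % i == 0 and sequence[i:] == sequence[:-i]:
--             return (sequence[:i], n // i)
--     return None
-- ===== Notes on version B (the rewrite author's own statement) =====
-- stated objective: faster
-- what changed: Instead of building and comparing a candidate tiling res*(n//i) for every prefix length i from 1 to n//2 and keeping the last success, B scans candidate lengths downward, skips non-divisors of n with a cheap modulo test, checks periodicity by one slice comparison sequence[i:]==sequence[:-i], and returns at the first (= largest) success.
import Mathlib
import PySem

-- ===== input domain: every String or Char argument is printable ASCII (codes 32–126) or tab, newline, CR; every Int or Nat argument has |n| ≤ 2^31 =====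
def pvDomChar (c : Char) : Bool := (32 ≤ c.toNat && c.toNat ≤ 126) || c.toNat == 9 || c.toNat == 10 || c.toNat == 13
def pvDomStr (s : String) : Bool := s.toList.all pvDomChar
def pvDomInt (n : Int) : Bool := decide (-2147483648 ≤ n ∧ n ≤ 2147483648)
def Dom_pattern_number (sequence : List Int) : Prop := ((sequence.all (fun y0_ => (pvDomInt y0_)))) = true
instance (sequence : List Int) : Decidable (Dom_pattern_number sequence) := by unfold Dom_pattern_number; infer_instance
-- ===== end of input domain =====

-- B replaces A's ascending scan over all prefix lengths (each building res*(n//i)) by a descending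
-- scan that filters non-divisors with a modulo test and checks tiling by one shifted-slice
-- comparison, returning at the first (= largest) success.


-- ===== PORT A =====
-- 'res is not None' is always true (res is a list slice), so the test reduces to the equality;
-- 'int(len(sequence)/len(res))' is truncating division, PySem.Int.truncdiv (exact for list lengths).
def pattern_number (sequence : List Int) : Option (List Int × Int) :=
  if (sequence.length : Int) ≤ 1 then none
  else
    let result :=
      (PySem.List.pyRange 1 (PySem.Int.floordiv (sequence.length : Int) 2 + 1) 1).foldl
        (fun result i =>
          let res := PySem.List.slice sequence (some 0) (some i)
          if PySem.List.pyRepeat res (PySem.Int.truncdiv (sequence.length : Int) (res.length : Int)) = sequence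
          then ((some res : Option (List Int)), PySem.Int.floordiv (sequence.length : Int) i)
          else result)
        ((none : Option (List Int)), (0 : Int))
    match result.1 with
    | some r => some (r, result.2)
    | none => none

-- ===== PORT B =====
def pattern_number_alt (sequence : List Int) : Option (List Int × Int) :=
  if (sequence.length : Int) ≤ 1 then none
  else
    match (PySem.List.pyRange (PySem.Int.floordiv (sequence.length : Int) 2) 0 (-1)).find?
        (fun i => PySem.Int.mod (sequence.length : Int) i == 0 &&
                  PySem.List.slice sequence (some i) none == PySem.List.slice sequence none (some (-i))) with
    | some i => some (PySem.List.slice sequence none (some i), PySem.Int.floordiv (sequence.length : Int) i)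
    | none => none

-- ===== PRECONDITION & SPEC =====
def Spec_pattern_number (sequence : List Int) (out : Option (List Int × Int)) : Prop := out = pattern_number_alt sequence
instance (sequence : List Int) (out : Option (List Int × Int)) : Decidable (Spec_pattern_number sequence out) := by unfold Spec_pattern_number; infer_instance

-- ===== CLAIM (what is proved, stated in full; the proofs are below) =====
def Claim_equal_pattern_number : Prop := ∀ (sequence : List Int), Dom_pattern_number sequence → Spec_pattern_number sequence (pattern_number sequence)

-- ===== LEMMAS AND PROOFS =====

-- A fold that overwrites its accumulator on every success returns the value of the LAST success,
-- i.e. the FIRST success of the reversed list.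
theorem foldl_last_success {α β : Type} (L : List α) (p : α → Prop) [DecidablePred p]
    (f : α → β) (init : β) :
    L.foldl (fun acc i => if p i then f i else acc) init =
      match L.reverse.find? (fun i => decide (p i)) with
      | some i => f i
      | none => init := by
  induction L generalizing init with
  | nil => simp
  | cons x L ih =>
    simp only [List.foldl_cons, List.reverse_cons, List.find?_append, ih]
    cases hf : L.reverse.find? (fun i => decide (p i)) with
    | some i => simp
    | none =>
      by_cases hx : p x <;> simp [List.find?, hx]

theorem find?_congr_mem {α : Type} (L : List α) (p q : α → Bool)
    (h : ∀ x ∈ L, p x = q x) : L.find? p = L.find? q := by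
  induction L with
  | nil => rfl
  | cons x L ih =>
    simp only [List.find?]
    rw [h x (by simp)]
    cases q x
    · exact ih (fun y hy => h y (by simp [hy]))
    · rfl

-- tiling structure: flatten (replicate (k+1) t) splits off t at either end
theorem flatten_replicate_succ {α : Type} (t : List α) (k : Nat) :
    (List.replicate (k + 1) t).flatten = t ++ (List.replicate k t).flatten := by
  simp [List.replicate_succ]

theorem flatten_replicate_succ' {α : Type} (t : List α) (k : Nat) :
    (List.replicate (k + 1) t).flatten = (List.replicate k t).flatten ++ t := by
  simp [List.replicate_succ']

-- core characterisation: the j-prefix tiles s with count n/j (A's replicate test)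
-- iff j divides n = s.length and the two shifted slices agree (B's test).
theorem tile_iff (s : List Int) (j : Nat) (hj : 1 ≤ j) (hjn : j ≤ s.length) :
    (List.replicate (s.length / j) (s.take j)).flatten = s ↔
      (j ∣ s.length ∧ s.drop j = s.take (s.length - j)) := by
  constructor
  · intro h
    have hlen : (s.length / j) * j = s.length := by
      have := congrArg List.length h
      simpa [List.length_flatten, Nat.min_eq_left hjn, Nat.mul_comm] using this
    have hdvd : j ∣ s.length := ⟨s.length / j, by rw [Nat.mul_comm]; omega⟩
    refine ⟨hdvd, ?_⟩
    obtain ⟨k, hk⟩ : ∃ k, s.length / j = k + 1 := by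
      have : 1 ≤ s.length / j := (Nat.one_le_div_iff (by omega)).mpr hjn
      exact ⟨s.length / j - 1, by omega⟩
    rw [hk] at h hlen
    have hsucc : (k + 1) * j = k * j + j := by ring
    have hflen : ((List.replicate k (s.take j)).flatten).length = k * j := by
      simp [List.length_flatten, Nat.min_eq_left hjn, Nat.mul_comm]
    have hdrop : s.drop j = (List.replicate k (s.take j)).flatten := by
      conv_lhs => rw [← h, flatten_replicate_succ]
      rw [List.drop_append_of_le_length (by simp [Nat.min_eq_left hjn])]
      simp
    have htake : s.take (s.length - j) = (List.replicate k (s.take j)).flatten := by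
      have hsl : s.length - j = k * j := by omega
      set t := s.take j with ht
      rw [hsl, ← h, flatten_replicate_succ']
      rw [List.take_append_of_le_length (le_of_eq hflen.symm)]
      exact List.take_of_length_le (le_of_eq hflen)
    rw [hdrop, htake]
  · rintro ⟨⟨k, hk⟩, hshift⟩
    have hdivk : s.length / j = k := by rw [hk]; exact Nat.mul_div_cancel_left k (by omega)
    rw [hdivk]
    clear hdivk hjn
    induction k generalizing s with
    | zero => simp_all
    | succ k ih =>
      have hmul : j * (k + 1) = j * k + j := by ring
      have hjn : j ≤ s.length := by omega
      have hk' : (s.drop j).length = j * k := by simp; omega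
      rcases Nat.eq_zero_or_pos k with hk0 | hk0
      · subst hk0
        have hdnil : s.drop j = [] := List.eq_nil_of_length_eq_zero (by omega)
        have hst : s.take j = s := List.take_of_length_le (by omega)
        simp [hst]
      · -- k ≥ 1 : apply the induction hypothesis to the tail r = s.drop j
        have hmul2 : j * k = j * (k - 1) + j := by
          have : k - 1 + 1 = k := by omega
          calc j * k = j * (k - 1 + 1) := by rw [this]
          _ = j * (k - 1) + j := by ring
        have hsl : s.length - j = j * k := by omega
        have hshift' : s.drop j = s.take (j * k) := by rw [hshift, hsl]
        have htail_shift : (s.drop j).drop j = (s.drop j).take ((s.drop j).length - j) := by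
          rw [hk']
          conv_lhs => rw [hshift', List.drop_take]
        have ihr := ih (s.drop j) htail_shift hk'
        have htj : (s.drop j).take j = s.take j := by
          rw [hshift', List.take_take]
          congr 1
          exact Nat.min_eq_left (by omega)
        have hfl : (List.replicate k (s.take j)).flatten = s.drop j := by
          rw [← htj]; exact ihr
        rw [flatten_replicate_succ, hfl]
        exact List.take_append_drop j s

-- the two search tests agree on every candidate length 1 ≤ j ≤ len(s)
theorem pred_agree (s : List Int) (j : Nat) (hj : 1 ≤ j) (hjn : j ≤ s.length) :
    decide (PySem.List.pyRepeat (PySem.List.slice s (some 0) (some (j : Int)))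
        (PySem.Int.truncdiv (s.length : Int) (((PySem.List.slice s (some 0) (some (j : Int))).length : Int)))
        = s)
      = (PySem.Int.mod (s.length : Int) (j : Int) == 0 &&
         PySem.List.slice s (some (j : Int)) none == PySem.List.slice s none (some (-(j : Int)))) := by
  have hs0 : PySem.List.slice s (some 0) (some (j : Int)) = s.take j := by
    rw [PySem.List.slice_zero_start, PySem.List.slice_to_natCast]
  have hlen : ((s.take j).length : Int) = (j : Int) := by
    simp [Nat.min_eq_left hjn]
  have htd : PySem.Int.truncdiv (s.length : Int) (j : Int) = ((s.length / j : Nat) : Int) := by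
    simp [PySem.Int.truncdiv, Int.tdiv]
  rw [hs0, hlen, htd, PySem.List.slice_from_natCast, PySem.List.slice_to_neg_natCast s j hj,
    PySem.Int.mod_natCast]
  rw [Bool.eq_iff_iff]
  simp only [PySem.List.pyRepeat, Int.toNat_natCast, Bool.and_eq_true, beq_iff_eq,
    decide_eq_true_eq, Nat.cast_eq_zero]
  rw [tile_iff s j hj hjn]
  constructor
  · rintro ⟨hd, hsh⟩
    exact ⟨Nat.dvd_iff_mod_eq_zero.mp hd, hsh⟩
  · rintro ⟨hm, hsh⟩
    exact ⟨Nat.dvd_iff_mod_eq_zero.mpr hm, hsh⟩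

theorem ports_agree (s : List Int) : pattern_number s = pattern_number_alt s := by
  by_cases h : (s.length : Int) ≤ 1
  · simp [pattern_number, pattern_number_alt, h]
  · simp only [pattern_number, pattern_number_alt, if_neg h]
    rw [PySem.Int.floordiv_eq_ediv_of_pos (by norm_num : (0:Int) < 2)]
    rw [foldl_last_success
      (p := fun i => PySem.List.pyRepeat (PySem.List.slice s (some 0) (some i))
          (PySem.Int.truncdiv (s.length : Int) (((PySem.List.slice s (some 0) (some i)).length : Int))) = s)
      (f := fun i => ((some (PySem.List.slice s (some 0) (some i)) : Option (List Int)),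
          PySem.Int.floordiv (s.length : Int) i))]
    rw [PySem.List.pyRange_neg_one_eq_reverse]
    have h01 : (0 : Int) + 1 = 1 := by norm_num
    rw [h01]
    rw [find?_congr_mem _ _
      (fun i => PySem.Int.mod (s.length : Int) i == 0 &&
        PySem.List.slice s (some i) none == PySem.List.slice s none (some (-i)))
      (by
        intro i hi
        rw [List.mem_reverse, PySem.List.mem_pyRange_one] at hi
        obtain ⟨hi1, hi2⟩ := hi
        have hnn : 0 ≤ i := by omega
        obtain ⟨j, rfl⟩ : ∃ j : Nat, i = (j : Int) := ⟨i.toNat, (Int.toNat_of_nonneg hnn).symm⟩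
        have hj1 : 1 ≤ j := by exact_mod_cast hi1
        have hjn : j ≤ s.length := by
          have hle : (j : Int) ≤ (s.length : Int) / 2 := by omega
          have hhalf : (s.length : Int) / 2 ≤ (s.length : Int) := by omega
          exact_mod_cast le_trans hle hhalf
        exact pred_agree s j hj1 hjn)]
    cases hf : (PySem.List.pyRange 1 ((s.length : Int) / 2 + 1) 1).reverse.find?
        (fun i => PySem.Int.mod (s.length : Int) i == 0 &&
          PySem.List.slice s (some i) none == PySem.List.slice s none (some (-i))) with
    | some i => simp [PySem.List.slice_zero_start]
    | none => simp

-- ===== VERDICT (by name: the statement is the Claim_ definition above) =====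
theorem pattern_number_spec : Claim_equal_pattern_number := by
  intro s _
  unfold Spec_pattern_number
  exact ports_agree s
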